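-- pv_equiv track=rewrite | github.com/invoice-reconcile-AI/invoice-env | server/env.py | _fuzzy_match_key
-- ===== SOURCE A (Python) =====
-- from typing import Any
--
-- def _fuzzy_match_key(key: str, candidates: Any) -> str | None:
--     key_words = set(key.split())
--     best: str | None = None
--     best_score = 0
--     for candidate in candidates:
--         score = len(key_words & set(candidate.split()))
--         if score > best_score:
--             best_score = score
--             best = candidate
--     return best if best_score > 0 else None
-- ===== SOURCE B (Python) =====
-- def _fuzzy_match_key(key, candidates):
--     cands = list(candidates)
--     word_sets = [set(c.split()) for c in cands]
--     tally = [0] * len(cands)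
--     for w in set(key.split()):
--         tally = [t + (1 if w in ws else 0) for t, ws in zip(tally, word_sets)]
--     best_i, best_score = -1, 0
--     for i, s in enumerate(tally):
--         if s > best_score:
--             best_i, best_score = i, s
--     return cands[best_i] if best_score > 0 else None
-- ===== Notes on version B (the rewrite author's own statement) =====
-- stated objective: alternative
-- what changed: B transposes the computation: it precomputes each candidate's word set, then iterates over the key's distinct words once, incrementing a per-candidate tally array, and finally scans the tally for the first maximal index; A instead computes a set intersection per candidate in a single pass.
import Mathlib
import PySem

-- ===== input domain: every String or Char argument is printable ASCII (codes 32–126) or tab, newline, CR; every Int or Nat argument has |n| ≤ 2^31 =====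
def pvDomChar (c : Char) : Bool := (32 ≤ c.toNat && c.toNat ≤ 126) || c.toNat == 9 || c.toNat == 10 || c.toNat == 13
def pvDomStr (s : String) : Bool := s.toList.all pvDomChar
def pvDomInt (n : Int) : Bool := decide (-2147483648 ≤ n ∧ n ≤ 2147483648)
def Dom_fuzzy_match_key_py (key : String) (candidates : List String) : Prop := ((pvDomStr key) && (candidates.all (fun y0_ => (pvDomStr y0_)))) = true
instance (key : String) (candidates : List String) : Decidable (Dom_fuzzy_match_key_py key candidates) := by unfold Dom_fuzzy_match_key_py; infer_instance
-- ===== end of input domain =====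

-- B replaces A's per-candidate set-intersection pass by a transposed tally sweep driven by
-- the key's distinct words, followed by a first-maximum index scan (objective: alternative).

-- ===== PORT A =====
def fuzzy_match_key_py (key : String) (candidates : List String) : Option String :=
  let key_words := PySem.Set.ofList (PySem.Str.split₀ key)
  let st := candidates.foldl
    (fun (st : Option String × Int) candidate =>
      let score : Int :=
        PySem.Set.len (PySem.Set.inter key_words (PySem.Set.ofList (PySem.Str.split₀ candidate)))
      if st.2 < score then (some candidate, score) else st)
    (none, 0)
  if 0 < st.2 then st.1 else none

-- ===== PORT B =====
def fuzzy_match_key_py_alt (key : String) (candidates : List String) : Option String :=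
  let word_sets := candidates.map (fun c => PySem.Set.ofList (PySem.Str.split₀ c))
  let tally0 : List Int := List.replicate candidates.length 0
  let tally := (PySem.Set.ofList (PySem.Str.split₀ key)).foldl
    (fun t w =>
      List.zipWith (fun ti ws => ti + (if PySem.Set.contains ws w then (1 : Int) else 0)) t word_sets)
    tally0
  let fin := (PySem.List.enumerate tally).foldl
    (fun (st : Int × Int) p => if st.2 < p.2 then (p.1, p.2) else st) (-1, 0)
  if 0 < fin.2 then PySem.List.pyGet? candidates fin.1 else none

-- ===== PRECONDITION & SPEC =====
def Spec_fuzzy_match_key_py (key : String) (candidates : List String) (out : Option String) : Prop := out = fuzzy_match_key_py_alt key candidates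
instance (key : String) (candidates : List String) (out : Option String) : Decidable (Spec_fuzzy_match_key_py key candidates out) := by unfold Spec_fuzzy_match_key_py; infer_instance

-- ===== CLAIM (what is proved, stated in full; the proofs are below) =====
def Claim_equal_fuzzy_match_key_py : Prop := ∀ (key : String) (candidates : List String), Dom_fuzzy_match_key_py key candidates → Spec_fuzzy_match_key_py key candidates (fuzzy_match_key_py key candidates)

-- ===== LEMMAS AND PROOFS =====

-- score of one candidate, as computed by A
def pvScore (K : PySem.Set String) (c : String) : Int :=
  PySem.Set.len (PySem.Set.inter K (PySem.Set.ofList (PySem.Str.split₀ c)))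

theorem pvScore_unfold (K : PySem.Set String) (c : String) :
    PySem.Set.len (PySem.Set.inter K (PySem.Set.ofList (PySem.Str.split₀ c))) = pvScore K c := rfl

theorem pvScore_eq_countP (K : PySem.Set String) (c : String) :
    pvScore K c = (K.countP (fun w => PySem.Set.contains (PySem.Set.ofList (PySem.Str.split₀ c)) w) : Int) := by
  simp [pvScore, PySem.Set.len, PySem.Set.inter, List.countP_eq_length_filter]

-- folding the per-word increment for a single candidate accumulates a countP
theorem pv_fold_scalar (K : List String) (ws : PySem.Set String) (a : Int) :
    K.foldl (fun a w => a + (if PySem.Set.contains ws w then (1 : Int) else 0)) a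
      = a + (K.countP (fun w => PySem.Set.contains ws w) : Int) := by
  induction K generalizing a with
  | nil => simp
  | cons w K ih =>
      simp only [List.foldl_cons, ih, List.countP_cons]
      by_cases h : PySem.Set.contains ws w <;> simp only [h, if_true] <;> push_cast <;> ring

-- the tally fold acts componentwise
theorem pv_fold_nil (K : List String) :
    K.foldl (fun (t : List Int) w =>
      List.zipWith (fun ti ws => ti + (if PySem.Set.contains ws w then (1 : Int) else 0)) t
        ([] : List (PySem.Set String))) [] = [] := by
  induction K with
  | nil => rfl
  | cons w K ih => simpa using ih

theorem pv_fold_cons (K : List String) (t0 : Int) (t' : List Int)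
    (ws0 : PySem.Set String) (wss' : List (PySem.Set String)) :
    K.foldl (fun t w =>
      List.zipWith (fun ti ws => ti + (if PySem.Set.contains ws w then (1 : Int) else 0)) t
        (ws0 :: wss')) (t0 :: t')
    = (K.foldl (fun a w => a + (if PySem.Set.contains ws0 w then (1 : Int) else 0)) t0)
      :: K.foldl (fun t w =>
          List.zipWith (fun ti ws => ti + (if PySem.Set.contains ws w then (1 : Int) else 0)) t wss') t' := by
  induction K generalizing t0 t' with
  | nil => rfl
  | cons w K ih => simpa using ih _ _

-- starting from the zero tally, the fold produces each candidate's countP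
theorem pv_tally_eq (K : List String) (wss : List (PySem.Set String)) :
    K.foldl (fun t w =>
      List.zipWith (fun ti ws => ti + (if PySem.Set.contains ws w then (1 : Int) else 0)) t wss)
      (List.replicate wss.length (0 : Int))
    = wss.map (fun ws => (K.countP (fun w => PySem.Set.contains ws w) : Int)) := by
  induction wss with
  | nil => simpa using pv_fold_nil K
  | cons ws0 wss' ih =>
      simp only [List.length_cons, List.replicate_succ, List.map_cons]
      rw [pv_fold_cons, ih, pv_fold_scalar]
      simp

-- the two final scans agree: A scans candidates keeping the best string, B scans
-- the enumerated score list keeping the best index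
theorem pv_scan (K : PySem.Set String) (all : List String) :
    ∀ (cs : List String) (k : Nat) (b : Option String) (bi s : Int),
    all.drop k = cs →
    (0 < s → PySem.List.pyGet? all bi = b) →
    (cs.foldl (fun (st : Option String × Int) c =>
        if st.2 < pvScore K c then (some c, pvScore K c) else st) (b, s)).2
      = ((PySem.List.enumerate (cs.map (pvScore K)) (k : Int)).foldl
          (fun (st : Int × Int) p => if st.2 < p.2 then (p.1, p.2) else st) (bi, s)).2
    ∧ (0 < (cs.foldl (fun (st : Option String × Int) c =>
        if st.2 < pvScore K c then (some c, pvScore K c) else st) (b, s)).2 →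
        PySem.List.pyGet? all
          ((PySem.List.enumerate (cs.map (pvScore K)) (k : Int)).foldl
            (fun (st : Int × Int) p => if st.2 < p.2 then (p.1, p.2) else st) (bi, s)).1
        = (cs.foldl (fun (st : Option String × Int) c =>
            if st.2 < pvScore K c then (some c, pvScore K c) else st) (b, s)).1) := by
  intro cs
  induction cs with
  | nil =>
      intro k b bi s _ hinv
      exact ⟨rfl, hinv⟩
  | cons c cs' ih =>
      intro k b bi s hd hinv
      have hget : all[k]? = some c := by
        have : (all.drop k)[0]? = some c := by rw [hd]; rfl
        simpa using this
      have hd' : all.drop (k + 1) = cs' := by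
        have h := List.drop_drop (i := 1) (j := k) (l := all)
        rw [hd] at h
        simp only [List.drop_one, List.tail_cons] at h
        exact h.symm
      simp only [List.map_cons, PySem.List.enumerate_cons, List.foldl_cons]
      have hk1 : (k : Int) + 1 = ((k + 1 : Nat) : Int) := by push_cast; ring
      by_cases hlt : s < pvScore K c
      · simp only [hlt, if_pos]
        rw [hk1]
        exact ih (k + 1) (some c) (k : Int) (pvScore K c) hd'
          (fun _ => by rw [PySem.List.pyGet?_natCast]; exact hget)
      · simp only [hlt, if_neg, not_false_iff]
        rw [hk1]
        exact ih (k + 1) b bi s hd' hinv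

-- ===== VERDICT (by name: the statement is the Claim_ definition above) =====
theorem fuzzy_match_key_py_spec : Claim_equal_fuzzy_match_key_py := by
  intro key candidates _
  show fuzzy_match_key_py key candidates = fuzzy_match_key_py_alt key candidates
  unfold fuzzy_match_key_py fuzzy_match_key_py_alt
  simp only [pvScore_unfold]
  set K := PySem.Set.ofList (PySem.Str.split₀ key) with hK
  have htally :
      K.foldl (fun t w =>
        List.zipWith (fun ti ws => ti + (if PySem.Set.contains ws w then (1 : Int) else 0)) t
          (candidates.map (fun c => PySem.Set.ofList (PySem.Str.split₀ c))))
        (List.replicate candidates.length (0 : Int))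
      = candidates.map (pvScore K) := by
    have h := pv_tally_eq K (candidates.map (fun c => PySem.Set.ofList (PySem.Str.split₀ c)))
    simp only [List.length_map] at h
    rw [h, List.map_map]
    exact List.map_congr_left (fun c _ => (pvScore_eq_countP K c).symm)
  have hscan := pv_scan K candidates candidates 0 none (-1) 0 (by simp)
      (fun h => absurd h (by omega))
  simp only [Nat.cast_zero] at hscan
  obtain ⟨h2, h1⟩ := hscan
  simp only [htally]
  rw [← h2]
  by_cases hpos : 0 < (candidates.foldl (fun (st : Option String × Int) c =>
      if st.2 < pvScore K c then (some c, pvScore K c) else st) (none, 0)).2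
  · simp only [hpos, if_pos]
    exact (h1 hpos).symm
  · simp [hpos]
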